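-- pv_equiv track=rewrite | github.com/yunzae/ProblemSolving | 구현/골프존1.py | solution
-- ===== SOURCE A (Python) =====
-- from collections import deque
--
-- def solution(books, target):
--     books_deq = deque(books,maxlen=len(books))
--     temp=[]
--     result=0
--     for t in target:
--         while books_deq:
--             now = books_deq.popleft()
--             if t==now:
--                 while temp:
--                     r = temp.pop()
--                     books_deq.appendleft(r)
--                 books_deq.appendleft(t)
--                 break
--             temp.append(now)
--             result+=1
--     return result
-- ===== SOURCE B (Python) =====
-- from collections import deque
--
-- def solution(books, target):
--     d = deque(books)
--     result = 0
--     for t in target: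
--         if t in d:
--             i = d.index(t)
--             result += i
--             del d[i]
--             d.appendleft(t)
--         else:
--             result += len(d)
--             d.clear()
--     return result
-- ===== Notes on version B (the rewrite author's own statement) =====
-- stated objective: simpler
-- what changed: Replaces A's per-target simulation loop (popleft each element into a temp stack, then push everything back one by one) with a direct move-to-front step: deque.index the target, add its position (or the length and clear when absent), delete it in place and appendleft it.
import Mathlib
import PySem

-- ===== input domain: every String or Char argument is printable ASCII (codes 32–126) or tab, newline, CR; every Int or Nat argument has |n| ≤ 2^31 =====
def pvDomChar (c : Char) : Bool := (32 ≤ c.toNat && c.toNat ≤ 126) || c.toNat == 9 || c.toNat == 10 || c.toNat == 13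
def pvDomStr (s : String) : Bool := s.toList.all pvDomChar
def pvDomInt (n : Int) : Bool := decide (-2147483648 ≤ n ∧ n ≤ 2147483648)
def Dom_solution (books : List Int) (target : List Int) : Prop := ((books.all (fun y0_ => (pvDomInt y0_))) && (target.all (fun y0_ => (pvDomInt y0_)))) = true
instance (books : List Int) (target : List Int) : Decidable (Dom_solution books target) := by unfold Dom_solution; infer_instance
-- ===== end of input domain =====

-- B replaces A's deque + temp-stack pop/restore by a direct move-to-front list (objective: simpler).

-- ===== PORT A =====
-- inner 'while books_deq' loop for one target t; state = (deque as list, temp stack, result)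
def pvWhileA (t : Int) : List Int → List Int → Int → (List Int × List Int × Int)
  | [], temp, result => ([], temp, result)
  | now :: rest, temp, result =>
      if t = now then
        -- 'while temp: books_deq.appendleft(temp.pop())' restores temp in order, then appendleft t
        (t :: (temp ++ rest), [], result)
      else
        pvWhileA t rest (temp ++ [now]) (result + 1)

def solution (books : List Int) (target : List Int) : Int :=
  (target.foldl (fun s t => pvWhileA t s.1 s.2.1 s.2.2) (books, ([], 0))).2.2

-- ===== PORT B =====
-- one target step of Source B: d.index(t) then 'del d[i]; d.appendleft(t)', or ValueError -> count all and clear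
def pvStepB (d : List Int) (result : Int) (t : Int) : List Int × Int :=
  match PySem.List.index? d t with
  | some i => (t :: d.eraseIdx i, result + (i : Int))   -- 'del d[i]' removes the i-th element: eraseIdx is exact
  | none => ([], result + (d.length : Int))

def solution_alt (books : List Int) (target : List Int) : Int :=
  (target.foldl (fun s t => pvStepB s.1 s.2 t) (books, 0)).2

-- ===== PRECONDITION & SPEC =====
def Spec_solution (books : List Int) (target : List Int) (out : Int) : Prop := out = solution_alt books target
instance (books : List Int) (target : List Int) (out : Int) : Decidable (Spec_solution books target out) := by unfold Spec_solution; infer_instance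

-- ===== CLAIM (what is proved, stated in full; the proofs are below) =====
def Claim_equal_solution : Prop := ∀ (books : List Int) (target : List Int), Dom_solution books target → Spec_solution books target (solution books target)

-- ===== LEMMAS AND PROOFS =====

lemma pvWhileA_spec (t : Int) : ∀ (deq temp : List Int) (r : Int),
    pvWhileA t deq temp r =
      match PySem.List.index? deq t with
      | some i => (t :: (temp ++ deq.take i ++ deq.drop (i + 1)), [], r + (i : Int))
      | none => ([], temp ++ deq, r + (deq.length : Int)) := by
  intro deq
  induction deq with
  | nil => intro temp r; simp [pvWhileA, PySem.List.index?]
  | cons now rest ih =>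
    intro temp r
    by_cases h : t = now
    · subst h
      rw [show PySem.List.index? (t :: rest) t = some 0 from PySem.List.index?_cons_self ..]
      simp [pvWhileA]
    · rw [pvWhileA, if_neg h, ih, PySem.List.index?_cons_of_ne rest (Ne.symm h)]
      cases hidx : PySem.List.index? rest t with
      | none => simp; omega
      | some i => simp [List.take_succ_cons, List.drop_succ_cons]; omega

lemma pvStepB_spec (d : List Int) (r : Int) (t : Int) :
    pvStepB d r t =
      match PySem.List.index? d t with
      | some i => (t :: (d.take i ++ d.drop (i + 1)), r + (i : Int))
      | none => ([], r + (d.length : Int)) := by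
  unfold pvStepB
  cases hidx : PySem.List.index? d t with
  | none => rfl
  | some i => simp [List.eraseIdx_eq_take_drop_succ]

-- main fold invariant: A's state (deq, temp, r) vs B's state (arr, r);
-- either temp is empty and deq = arr, or both lists are empty (temp then dead).
lemma pv_fold_inv : ∀ (target deq temp arr : List Int) (r : Int),
    (deq = arr ∧ temp = []) ∨ (deq = [] ∧ arr = []) →
    (target.foldl (fun s t => pvWhileA t s.1 s.2.1 s.2.2) (deq, (temp, r))).2.2 =
    (target.foldl (fun s t => pvStepB s.1 s.2 t) (arr, r)).2 := by
  intro target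
  induction target with
  | nil =>
    rintro deq temp arr r (⟨rfl, rfl⟩ | ⟨rfl, rfl⟩) <;> rfl
  | cons t ts ih =>
    rintro deq temp arr r (⟨rfl, rfl⟩ | ⟨rfl, rfl⟩)
    · show (ts.foldl (fun s t => pvWhileA t s.1 s.2.1 s.2.2) (pvWhileA t deq [] r)).2.2 =
           (ts.foldl (fun s t => pvStepB s.1 s.2 t) (pvStepB deq r t)).2
      rw [pvWhileA_spec, pvStepB_spec]
      cases hidx : PySem.List.index? deq t with
      | none => exact ih _ _ _ _ (Or.inr ⟨rfl, rfl⟩)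
      | some i => exact ih _ _ _ _ (Or.inl ⟨by simp, rfl⟩)
    · show (ts.foldl (fun s t => pvWhileA t s.1 s.2.1 s.2.2) (pvWhileA t [] temp r)).2.2 =
           (ts.foldl (fun s t => pvStepB s.1 s.2 t) (pvStepB [] r t)).2
      rw [show pvStepB [] r t = ([], r) from by simp [pvStepB, PySem.List.index?]]
      exact ih _ _ _ _ (Or.inr ⟨rfl, rfl⟩)

-- ===== VERDICT (by name: the statement is the Claim_ definition above) =====
theorem solution_spec : Claim_equal_solution := by
  intro books target _
  unfold Spec_solution solution solution_alt
  exact pv_fold_inv target books [] books 0 (Or.inl ⟨rfl, rfl⟩)
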